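-- pv_equiv track=rewrite | github.com/ca1773130n/HarnessSync | src/incremental_sync.py | changed_files
-- ===== SOURCE A (Python) =====
-- def changed_files(
--     current_fingerprints: dict[str, str],
--     stored_fingerprints: dict[str, str],
-- ) -> tuple[list[str], list[str], list[str]]:
--     """Compare current vs. stored fingerprints to identify changed files.
--
--     Args:
--         current_fingerprints: Dict of str(path) → current fingerprint.
--         stored_fingerprints: Dict of str(path) → previously stored fingerprint.
--
--     Returns:
--         Tuple of (new_paths, modified_paths, deleted_paths) — all as str lists.
--     """
--     new: list[str] = []
--     modified: list[str] = []
--     deleted: list[str] = []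
--
--     all_keys = set(current_fingerprints) | set(stored_fingerprints)
--     for key in sorted(all_keys):
--         current = current_fingerprints.get(key, "")
--         stored = stored_fingerprints.get(key, "")
--         if stored == "" and current != "":
--             new.append(key)
--         elif stored != "" and current == "":
--             deleted.append(key)
--         elif current != stored:
--             modified.append(key)
--
--     return new, modified, deleted
-- ===== SOURCE B (Python) =====
-- def changed_files(
--     current_fingerprints: dict[str, str],
--     stored_fingerprints: dict[str, str],
-- ) -> tuple[list[str], list[str], list[str]]:
--     """Classify files as new/modified/deleted via set algebra on the keys
--     whose fingerprints are non-empty (an empty fingerprint means 'absent')."""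
--     cur = {k for k, v in current_fingerprints.items() if v != ""}
--     sto = {k for k, v in stored_fingerprints.items() if v != ""}
--     new = sorted(cur - sto)
--     deleted = sorted(sto - cur)
--     modified = sorted(k for k in cur & sto
--                       if current_fingerprints[k] != stored_fingerprints[k])
--     return new, modified, deleted
-- ===== Notes on version B (the rewrite author's own statement) =====
-- stated objective: simpler
-- what changed: Replaces A's single pass over the sorted union of keys with a per-key three-way branch by set algebra: build the two sets of keys with non-empty fingerprints, then new/deleted are sorted set differences and modified is a sorted filter of the intersection.
import Mathlib
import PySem

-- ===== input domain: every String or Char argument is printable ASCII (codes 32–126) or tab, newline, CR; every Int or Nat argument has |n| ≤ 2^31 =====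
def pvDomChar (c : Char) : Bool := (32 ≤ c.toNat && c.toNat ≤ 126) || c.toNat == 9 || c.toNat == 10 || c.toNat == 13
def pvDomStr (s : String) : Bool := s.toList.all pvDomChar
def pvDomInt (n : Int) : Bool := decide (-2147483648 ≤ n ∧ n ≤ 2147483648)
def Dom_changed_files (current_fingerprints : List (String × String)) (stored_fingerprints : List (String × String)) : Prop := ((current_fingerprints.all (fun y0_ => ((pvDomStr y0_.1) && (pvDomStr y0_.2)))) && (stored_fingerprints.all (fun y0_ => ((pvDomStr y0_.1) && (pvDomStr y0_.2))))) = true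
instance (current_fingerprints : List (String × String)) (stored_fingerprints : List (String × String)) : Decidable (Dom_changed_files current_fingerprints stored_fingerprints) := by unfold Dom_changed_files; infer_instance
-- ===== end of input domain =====

-- B replaces A's single pass over the sorted key union (branching per key) by set
-- algebra: difference/intersection of the non-empty-fingerprint key sets, sorted
-- independently (objective: simpler).

-- ===== PORT A =====
-- dicts are association lists (first match wins): d.get(k, "") = (lookup k d).getD ""
def changed_files (current_fingerprints : List (String × String)) (stored_fingerprints : List (String × String)) : List String × List String × List String :=
  let all_keys : PySem.Set String :=
    PySem.Set.union (PySem.Set.ofList (current_fingerprints.map Prod.fst))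
      (PySem.Set.ofList (stored_fingerprints.map Prod.fst))
  (PySem.List.sorted all_keys (fun x => x) false).foldl
    (fun acc key =>
      let current := (List.lookup key current_fingerprints).getD ""
      let stored := (List.lookup key stored_fingerprints).getD ""
      if stored = "" ∧ current ≠ "" then (acc.1 ++ [key], acc.2.1, acc.2.2)
      else if stored ≠ "" ∧ current = "" then (acc.1, acc.2.1, acc.2.2 ++ [key])
      else if current ≠ stored then (acc.1, acc.2.1 ++ [key], acc.2.2)
      else acc)
    ([], [], [])

-- ===== PORT B =====
def changed_files_alt (current_fingerprints : List (String × String)) (stored_fingerprints : List (String × String)) : List String × List String × List String :=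
  let cur : PySem.Set String :=
    (PySem.Set.ofList (current_fingerprints.map Prod.fst)).filter
      (fun k => (List.lookup k current_fingerprints).getD "" != "")
  let sto : PySem.Set String :=
    (PySem.Set.ofList (stored_fingerprints.map Prod.fst)).filter
      (fun k => (List.lookup k stored_fingerprints).getD "" != "")
  let new := PySem.List.sorted (PySem.Set.diff cur sto) (fun x => x) false
  let deleted := PySem.List.sorted (PySem.Set.diff sto cur) (fun x => x) false
  let modified := PySem.List.sorted
    ((PySem.Set.inter cur sto).filter
      (fun k => (List.lookup k current_fingerprints).getD ""
             != (List.lookup k stored_fingerprints).getD ""))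
    (fun x => x) false
  (new, modified, deleted)

-- ===== PRECONDITION & SPEC =====
def Spec_changed_files (current_fingerprints : List (String × String)) (stored_fingerprints : List (String × String)) (out : List String × List String × List String) : Prop := out = changed_files_alt current_fingerprints stored_fingerprints
instance (current_fingerprints : List (String × String)) (stored_fingerprints : List (String × String)) (out : List String × List String × List String) : Decidable (Spec_changed_files current_fingerprints stored_fingerprints out) := by unfold Spec_changed_files; infer_instance

-- ===== CLAIM (what is proved, stated in full; the proofs are below) =====
def Claim_equal_changed_files : Prop := ∀ (current_fingerprints : List (String × String)) (stored_fingerprints : List (String × String)), Dom_changed_files current_fingerprints stored_fingerprints → Spec_changed_files current_fingerprints stored_fingerprints (changed_files current_fingerprints stored_fingerprints)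

-- ===== LEMMAS AND PROOFS =====

-- if a key is not among the first components, lookup finds nothing (so .get(k,"") = "")
theorem pv_lookup_not_mem {l : List (String × String)} {k : String}
    (h : k ∉ l.map Prod.fst) : List.lookup k l = none := by
  induction l with
  | nil => rfl
  | cons p t ih =>
    simp only [List.map_cons, List.mem_cons, not_or] at h
    simp [List.lookup, beq_eq_false_iff_ne.mpr h.1, ih h.2]

theorem pv_mem_of_getD_ne {l : List (String × String)} {k : String}
    (h : (List.lookup k l).getD "" ≠ "") : k ∈ l.map Prod.fst := by
  by_contra hk
  rw [pv_lookup_not_mem hk] at h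
  exact h rfl

-- A's loop over any key list, with arbitrary accumulators, is three filters
theorem pv_tri (cur sto : List (String × String)) (l : List String)
    (a b c : List String) :
    l.foldl
      (fun acc key =>
        let current := (List.lookup key cur).getD ""
        let stored := (List.lookup key sto).getD ""
        if stored = "" ∧ current ≠ "" then (acc.1 ++ [key], acc.2.1, acc.2.2)
        else if stored ≠ "" ∧ current = "" then (acc.1, acc.2.1, acc.2.2 ++ [key])
        else if current ≠ stored then (acc.1, acc.2.1 ++ [key], acc.2.2)
        else acc)
      (a, b, c)
    = (a ++ l.filter (fun k => decide ((List.lookup k sto).getD "" = "" ∧ (List.lookup k cur).getD "" ≠ "")),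
       b ++ l.filter (fun k => decide (¬((List.lookup k sto).getD "" = "" ∧ (List.lookup k cur).getD "" ≠ "") ∧
              ¬((List.lookup k sto).getD "" ≠ "" ∧ (List.lookup k cur).getD "" = "") ∧
              (List.lookup k cur).getD "" ≠ (List.lookup k sto).getD "")),
       c ++ l.filter (fun k => decide (¬((List.lookup k sto).getD "" = "" ∧ (List.lookup k cur).getD "" ≠ "") ∧
              ((List.lookup k sto).getD "" ≠ "" ∧ (List.lookup k cur).getD "" = "")))) := by
  induction l generalizing a b c with
  | nil => simp
  | cons x t ih =>
    simp only [List.foldl_cons, List.filter_cons]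
    split_ifs with h1 h2 h3 <;>
      simp_all [List.append_assoc]

theorem changed_files_spec_aux (cur sto : List (String × String)) :
    changed_files cur sto = changed_files_alt cur sto := by
  unfold changed_files changed_files_alt
  simp only []
  rw [pv_tri]
  simp only [List.nil_append]
  have hnodupU : (PySem.Set.union (PySem.Set.ofList (cur.map Prod.fst))
      (PySem.Set.ofList (sto.map Prod.fst))).Nodup :=
    PySem.Set.nodup_union _ _ (PySem.Set.nodup_ofList _)
  have hK : (PySem.List.sorted (PySem.Set.union (PySem.Set.ofList (cur.map Prod.fst))
      (PySem.Set.ofList (sto.map Prod.fst))) (fun x => x) false).Nodup :=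
    (PySem.List.sorted_perm _ _ _).nodup_iff.mpr hnodupU
  have hle := PySem.List.sorted_pairwise (xs := PySem.Set.union (PySem.Set.ofList (cur.map Prod.fst))
      (PySem.Set.ofList (sto.map Prod.fst))) (key := fun x => x)
  have hlt : (PySem.List.sorted (PySem.Set.union (PySem.Set.ofList (cur.map Prod.fst))
      (PySem.Set.ofList (sto.map Prod.fst))) (fun x => x) false).Pairwise (· < ·) :=
    (hle.and hK).imp (fun h => lt_of_le_of_ne h.1 h.2)
  set K := PySem.List.sorted (PySem.Set.union (PySem.Set.ofList (cur.map Prod.fst))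
      (PySem.Set.ofList (sto.map Prod.fst))) (fun x => x) false with hKdef
  have hmemK : ∀ x, x ∈ K ↔ (x ∈ cur.map Prod.fst ∨ x ∈ sto.map Prod.fst) := by
    intro x
    rw [hKdef, PySem.List.mem_sorted, PySem.Set.mem_union]
    simp [PySem.Set.mem_ofList]
  have hcurne : ∀ x, (List.lookup x cur).getD "" ≠ "" → x ∈ cur.map Prod.fst :=
    fun x h => pv_mem_of_getD_ne h
  have hstone : ∀ x, (List.lookup x sto).getD "" ≠ "" → x ∈ sto.map Prod.fst :=
    fun x h => pv_mem_of_getD_ne h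
  have hcurnm : ∀ x, x ∉ cur.map Prod.fst → (List.lookup x cur).getD "" = "" := by
    intro x h; rw [pv_lookup_not_mem h]; rfl
  have hstonm : ∀ x, x ∉ sto.map Prod.fst → (List.lookup x sto).getD "" = "" := by
    intro x h; rw [pv_lookup_not_mem h]; rfl
  -- membership in B's sets
  have hmemCur : ∀ x, x ∈ (PySem.Set.ofList (cur.map Prod.fst)).filter
      (fun k => (List.lookup k cur).getD "" != "") ↔
      (List.lookup x cur).getD "" ≠ "" := by
    intro x
    simp only [List.mem_filter, PySem.Set.mem_ofList, bne_iff_ne, ne_eq]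
    exact ⟨fun h => h.2, fun h => ⟨hcurne x h, h⟩⟩
  have hmemSto : ∀ x, x ∈ (PySem.Set.ofList (sto.map Prod.fst)).filter
      (fun k => (List.lookup k sto).getD "" != "") ↔
      (List.lookup x sto).getD "" ≠ "" := by
    intro x
    simp only [List.mem_filter, PySem.Set.mem_ofList, bne_iff_ne, ne_eq]
    exact ⟨fun h => h.2, fun h => ⟨hstone x h, h⟩⟩
  have hnodupCur : ((PySem.Set.ofList (cur.map Prod.fst)).filter
      (fun k => (List.lookup k cur).getD "" != "")).Nodup :=
    (PySem.Set.nodup_ofList _).filter _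
  have hnodupSto : ((PySem.Set.ofList (sto.map Prod.fst)).filter
      (fun k => (List.lookup k sto).getD "" != "")).Nodup :=
    (PySem.Set.nodup_ofList _).filter _
  refine Prod.ext ?_ (Prod.ext ?_ ?_)
  · -- new
    show K.filter _ = PySem.List.sorted _ (fun x => x) false
    refine (PySem.List.sorted_eq_of_perm_of_pairwise_lt _ _ _ ?_ ?_).symm
    · refine (List.perm_ext_iff_of_nodup (hK.filter _) (PySem.Set.nodup_diff _ _ hnodupCur)).mpr ?_
      intro x
      rw [List.mem_filter, PySem.Set.mem_diff, hmemCur, hmemSto, hmemK]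
      simp only [decide_eq_true_eq]
      constructor
      · rintro ⟨_, hs, hc⟩; exact ⟨hc, fun h => h hs⟩
      · rintro ⟨hc, hs⟩
        refine ⟨Or.inl (hcurne x hc), ?_, hc⟩
        by_cases hm : x ∈ sto.map Prod.fst
        · by_contra hne; exact hs hne
        · exact hstonm x hm
    · exact hlt.filter _
  · -- modified
    show K.filter _ = PySem.List.sorted _ (fun x => x) false
    refine (PySem.List.sorted_eq_of_perm_of_pairwise_lt _ _ _ ?_ ?_).symm
    · refine (List.perm_ext_iff_of_nodup (hK.filter _)
        ((PySem.Set.nodup_inter _ _ hnodupCur).filter _)).mpr ?_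
      intro x
      rw [List.mem_filter, List.mem_filter, PySem.Set.mem_inter, hmemCur, hmemSto, hmemK]
      simp only [decide_eq_true_eq, bne_iff_ne, ne_eq]
      have htr : (List.lookup x cur).getD "" = "" → (List.lookup x sto).getD "" = "" →
          (List.lookup x cur).getD "" = (List.lookup x sto).getD "" :=
        fun h1 h2 => h1.trans h2.symm
      constructor
      · rintro ⟨hk, hn, hd, hm⟩
        refine ⟨⟨?_, ?_⟩, hm⟩ <;> tauto
      · rintro ⟨⟨hc, hs⟩, hm⟩
        exact ⟨Or.inl (hcurne x hc), fun h => hs h.1, fun h => hc h.2, hm⟩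
    · exact hlt.filter _
  · -- deleted
    show K.filter _ = PySem.List.sorted _ (fun x => x) false
    refine (PySem.List.sorted_eq_of_perm_of_pairwise_lt _ _ _ ?_ ?_).symm
    · refine (List.perm_ext_iff_of_nodup (hK.filter _) (PySem.Set.nodup_diff _ _ hnodupSto)).mpr ?_
      intro x
      rw [List.mem_filter, PySem.Set.mem_diff, hmemCur, hmemSto, hmemK]
      simp only [decide_eq_true_eq]
      constructor
      · rintro ⟨_, hn, hs, hc⟩; exact ⟨hs, fun h => h hc⟩
      · rintro ⟨hs, hc⟩
        have hc' : (List.lookup x cur).getD "" = "" := by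
          by_cases hm : x ∈ cur.map Prod.fst
          · by_contra hne; exact hc hne
          · exact hcurnm x hm
        exact ⟨Or.inr (hstone x hs), fun h => h.2 hc', hs, hc'⟩
    · exact hlt.filter _

-- ===== VERDICT (by name: the statement is the Claim_ definition above) =====
theorem changed_files_spec : Claim_equal_changed_files := by
  intro cur sto _
  unfold Spec_changed_files
  exact changed_files_spec_aux cur sto
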